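-- pv_equiv track=rewrite | github.com/nail82/blog_photos | bub_blog_upload/exif_date.py | resolve_dups
-- ===== SOURCE A (Python) =====
-- def resolve_dups(ts_names):
--     """An iterative version for resolving dups."""
--     suffix = 0
--     resolved = ts_names.copy()
--
--     def myjoin(name, suffix):
--         if suffix == 0:
--             return name
--         else:
--             return "-".join([name, str(suffix)])
--
--     for i in range(1, len(ts_names)):
--         suffix = suffix + 1 if ts_names[i] == ts_names[i-1] else 0
--         resolved[i] = myjoin(ts_names[i], suffix)
--
--     return resolved
-- ===== SOURCE B (Python) =====
-- def resolve_dups(ts_names):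
--     """Run-based version: scan each maximal run of equal adjacent names and
--     number its members 0..len(run)-1 (0 -> plain name, k -> name-k)."""
--     out = []
--     i = 0
--     n = len(ts_names)
--     while i < n:
--         j = i + 1
--         while j < n and ts_names[j] == ts_names[i]:
--             j += 1
--         out.append(ts_names[i])
--         for k in range(1, j - i):
--             out.append("-".join([ts_names[i], str(k)]))
--         i = j
--     return out
-- ===== Notes on version B (the rewrite author's own statement) =====
-- stated objective: alternative
-- what changed: Replaces A's single pass with a carried suffix counter and in-place index assignment into a copy by explicit run-grouping: an outer loop finds each maximal run of equal adjacent names and appends the plain name plus name-k for k=1..run_length-1 to a freshly built output list.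
import Mathlib
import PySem

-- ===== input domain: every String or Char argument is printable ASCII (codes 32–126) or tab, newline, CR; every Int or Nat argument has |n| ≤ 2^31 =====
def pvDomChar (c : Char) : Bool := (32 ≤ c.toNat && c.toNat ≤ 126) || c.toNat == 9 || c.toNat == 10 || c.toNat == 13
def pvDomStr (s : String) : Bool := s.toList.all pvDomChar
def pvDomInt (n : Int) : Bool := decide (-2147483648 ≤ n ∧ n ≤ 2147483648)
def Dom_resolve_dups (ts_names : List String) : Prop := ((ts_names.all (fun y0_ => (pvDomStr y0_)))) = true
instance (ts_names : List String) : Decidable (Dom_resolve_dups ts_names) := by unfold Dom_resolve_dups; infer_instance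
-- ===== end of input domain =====

-- B replaces A's carried-suffix single pass with explicit run-grouping (alternative decomposition, same cost).

-- ===== PORT A =====
-- inner helper 'myjoin' of A
def pvMyjoin (name : String) (suffix : Int) : String :=
  if suffix = 0 then name else PySem.Str.join "-" [name, PySem.Int.toStr suffix]

def resolve_dups (ts_names : List String) : List String :=
  -- suffix = 0; resolved = ts_names.copy(); for i in range(1, len(ts_names)): ...
  let r := (PySem.List.pyRange 1 ((ts_names.length : Int)) 1).foldl
    (fun (st : Int × List String) (i : Int) =>
      let suffix := if PySem.List.pyGetD ts_names i "" == PySem.List.pyGetD ts_names (i - 1) ""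
                    then st.1 + 1 else 0
      (suffix, PySem.List.pySetD st.2 i (pvMyjoin (PySem.List.pyGetD ts_names i "") suffix)))
    ((0 : Int), ts_names)
  r.2

-- ===== PORT B =====
def resolve_dups_alt (ts_names : List String) : List String :=
  match ts_names with
  | [] => []
  | x :: rest =>
      -- inner while: advance j while ts_names[j] == ts_names[i]  (j - i = run.length + 1)
      let run := rest.takeWhile (fun y => y == x)
      let rest' := rest.dropWhile (fun y => y == x)
      (x :: (PySem.List.pyRange 1 (1 + (run.length : Int)) 1).map
              (fun k => PySem.Str.join "-" [x, PySem.Int.toStr k]))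
        ++ resolve_dups_alt rest'
termination_by ts_names.length
decreasing_by
  have := List.length_dropWhile_le (p := fun y => y == x) (l := rest)
  simpa using Nat.lt_succ_of_le this

-- ===== PRECONDITION & SPEC =====
def Spec_resolve_dups (ts_names : List String) (out : List String) : Prop := out = resolve_dups_alt ts_names
instance (ts_names : List String) (out : List String) : Decidable (Spec_resolve_dups ts_names out) := by unfold Spec_resolve_dups; infer_instance

-- ===== CLAIM (what is proved, stated in full; the proofs are below) =====
def Claim_equal_resolve_dups : Prop := ∀ (ts_names : List String), Dom_resolve_dups ts_names → Spec_resolve_dups ts_names (resolve_dups ts_names)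

-- ===== LEMMAS AND PROOFS =====

-- canonical recursive form: goA prev s l = tail of the output, carrying previous name and suffix
def goA (prev : String) (s : Int) : List String → List String
  | [] => []
  | y :: l =>
      let s' := if y == prev then s + 1 else 0
      pvMyjoin y s' :: goA y s' l

theorem goA_run (l : List String) (r : List String) (prev : String) (s : Int)
    (hs : 0 ≤ s) (hl : ∀ y ∈ l, y = prev) :
    goA prev s (l ++ r)
      = (PySem.List.pyRange (s + 1) (s + 1 + (l.length : Int)) 1).map
          (fun k => PySem.Str.join "-" [prev, PySem.Int.toStr k])
        ++ goA prev (s + (l.length : Int)) r := by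
  induction l generalizing s with
  | nil =>
      simp
  | cons y l ih =>
      have hy : y = prev := hl y (by simp)
      subst hy
      have hcons : PySem.List.pyRange (s + 1) (s + 1 + ((y :: l).length : Int)) 1
          = (s + 1) :: PySem.List.pyRange (s + 1 + 1) (s + 1 + ((y :: l).length : Int)) 1 := by
        apply PySem.List.pyRange_one_cons
        simp only [List.length_cons]
        push_cast
        omega
      rw [hcons]
      simp only [goA, beq_self_eq_true, if_true, List.cons_append, List.map_cons]
      have hne : s + 1 ≠ 0 := by omega
      rw [ih (s + 1) (by omega) (fun z hz => hl z (by simp [hz]))]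
      simp only [pvMyjoin, if_neg hne, List.length_cons]
      have h2 : s + 1 + 1 = s + 1 + 1 := rfl
      have h3 : (s + 1) + (l.length : Int) = s + ((l.length + 1 : Nat) : Int) := by push_cast; ring
      rw [h3]
      have h4 : s + 1 + 1 + (l.length : Int) = s + 1 + ((l.length + 1 : Nat) : Int) := by push_cast; ring
      rw [h4]

theorem alt_eq_goA (ts : List String) :
    resolve_dups_alt ts = match ts with
      | [] => []
      | x :: rest => x :: goA x 0 rest := by
  induction ts using resolve_dups_alt.induct with
  | case1 => simp [resolve_dups_alt]
  | case2 x rest run ih =>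
      rw [resolve_dups_alt]
      simp only []
      have hsplit : rest = rest.takeWhile (fun y => y == x) ++ rest.dropWhile (fun y => y == x) :=
        (List.takeWhile_append_dropWhile).symm
      conv_rhs => rw [hsplit]
      rw [goA_run _ _ x 0 le_rfl (fun y hy => by
        have := List.mem_takeWhile_imp hy
        exact eq_of_beq this)]
      have htail : goA x (0 + ((rest.takeWhile (fun y => y == x)).length : Int))
          (rest.dropWhile (fun y => y == x)) = resolve_dups_alt (rest.dropWhile (fun y => y == x)) := by
        cases hdw : rest.dropWhile (fun y => y == x) with
        | nil => simp [goA, resolve_dups_alt]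
        | cons h t =>
            have hpf : (h == x) = false := by
              have := List.head_dropWhile_not (p := fun y => y == x) (l := rest) (by simp [hdw])
              simpa [hdw] using this
            have ih2 := ih
            simp only [run, hdw] at ih2
            rw [ih2]
            simp [goA, hpf, pvMyjoin]
      rw [htail]
      simp [zero_add]

theorem fold_set (ts : List String) :
    ∀ (v u acc : List String) (s : Int) (hu : u ≠ []),
      ts = u ++ v → acc.length = ts.length → 0 ≤ s →
      ((PySem.List.pyRange (u.length : Int) (ts.length : Int) 1).foldl
        (fun (st : Int × List String) (i : Int) =>
          let suffix := if PySem.List.pyGetD ts i "" == PySem.List.pyGetD ts (i - 1) ""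
                        then st.1 + 1 else 0
          (suffix, PySem.List.pySetD st.2 i (pvMyjoin (PySem.List.pyGetD ts i "") suffix)))
        (s, acc)).2
      = acc.take u.length ++ goA (u.getLast hu) s v := by
  intro v
  induction v with
  | nil =>
      intro u acc s hu hts hlen hs
      have h1 : ts.length = u.length := by simp [hts]
      rw [h1, PySem.List.pyRange_one_eq_nil le_rfl]
      simp [goA, List.take_of_length_le (le_of_eq (hlen.trans h1))]
  | cons y v ih =>
      intro u acc s hu hts hlen hs
      have hk : u.length < ts.length := by simp [hts]
      have hcons : PySem.List.pyRange (u.length : Int) (ts.length : Int) 1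
          = (u.length : Int) :: PySem.List.pyRange ((u.length : Int) + 1) (ts.length : Int) 1 :=
        PySem.List.pyRange_one_cons (by exact_mod_cast hk)
      rw [hcons, List.foldl_cons]
      -- evaluate the step at i = u.length
      have hcur : PySem.List.pyGetD ts (u.length : Int) "" = y := by
        rw [PySem.List.pyGetD_natCast, hts]
        rw [List.getD_eq_getElem?_getD, List.getElem?_append_right le_rfl]
        simp
      have hprev : PySem.List.pyGetD ts ((u.length : Int) - 1) "" = u.getLast hu := by
        have hu1 : 1 ≤ u.length := List.length_pos_iff.mpr hu
        have : ((u.length : Int) - 1) = ((u.length - 1 : Nat) : Int) := by push_cast [hu1]; ring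
        rw [this, PySem.List.pyGetD_natCast, hts]
        rw [List.getD_eq_getElem?_getD, List.getElem?_append_left (by omega)]
        rw [List.getLast_eq_getElem]
        simp [List.getElem?_eq_getElem (by omega : u.length - 1 < u.length)]
      simp only [hcur, hprev]
      set s' : Int := if (y == u.getLast hu) then s + 1 else 0 with hs'
      have hs'0 : 0 ≤ s' := by rw [hs']; split_ifs <;> omega
      have hulen : ((u ++ [y]).length : Int) = (u.length : Int) + 1 := by simp
      have happly := ih (u ++ [y]) (PySem.List.pySetD acc (u.length : Int)
          (pvMyjoin y s')) s' (by simp)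
          (by rw [hts]; simp)
          (by rw [PySem.List.pySetD_natCast]; simpa using hlen) hs'0
      rw [hulen] at happly
      rw [happly]
      have hlast : (u ++ [y]).getLast (by simp) = y := by
        simp
      rw [hlast]
      -- (acc.set k v).take (k+1) = acc.take k ++ [v]
      have hklen : u.length < acc.length := by omega
      have htake : (PySem.List.pySetD acc (u.length : Int) (pvMyjoin y s')).take (u.length + 1)
          = acc.take u.length ++ [pvMyjoin y s'] := by
        rw [PySem.List.pySetD_natCast]
        rw [List.set_eq_take_append_cons_drop, if_pos hklen]
        have hlt : (acc.take u.length).length = u.length := by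
          simp [List.length_take, Nat.min_eq_left (le_of_lt hklen)]
        rw [List.take_append, hlt]
        simp
      simp only [List.length_append, List.length_cons, List.length_nil] at htake ⊢
      rw [htake]
      simp [goA, hs', List.append_assoc]

theorem a_eq_goA (ts : List String) :
    resolve_dups ts = match ts with
      | [] => []
      | x :: rest => x :: goA x 0 rest := by
  cases ts with
  | nil => simp [resolve_dups]
  | cons x rest =>
      rw [resolve_dups]
      simp only [List.length_cons]
      have h := fold_set (x :: rest) rest [x] (x :: rest) 0 (by simp) rfl rfl le_rfl
      simp only [List.length_cons, List.length_nil, Nat.zero_add, Nat.cast_one] at h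
      rw [h]
      simp [List.getLast]

-- ===== VERDICT (by name: the statement is the Claim_ definition above) =====
theorem resolve_dups_spec : Claim_equal_resolve_dups := by
  intro ts _
  unfold Spec_resolve_dups
  rw [a_eq_goA, alt_eq_goA]
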